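-- pv_equiv track=rewrite | github.com/Ggwp-code/student_exam_seating_project | seat_layout.py | find_non_adjacent_position
-- ===== SOURCE A (Python) =====
-- def get_adjacent_positions(x, y, cols, rows):
--     """Get all valid adjacent positions (including diagonals)."""
--     adjacents = []
--     for dx in [-1, 0, 1]:
--         for dy in [-1, 0, 1]:
--             if dx == 0 and dy == 0:
--                 continue
--             nx, ny = x + dx, y + dy
--             if 0 <= nx < cols and 0 <= ny < rows:
--                 adjacents.append((nx, ny))
--     return adjacents
--
-- def is_adjacent_to_friend(x, y, student_id, assigned_positions, friend_graph, cols, rows):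
--     """
--     Check if placing student at (x, y) would be adjacent to a friend.
--
--     Args:
--         x, y: Position to check
--         student_id: Student being placed
--         assigned_positions: Dict mapping (x, y) -> student_id
--         friend_graph: Dict mapping student_id -> set of friend student_ids
--         cols, rows: Room dimensions
--
--     Returns:
--         True if position is adjacent to a friend
--     """
--     if student_id not in friend_graph:
--         return False
--
--     friends = friend_graph[student_id]
--     for adj_x, adj_y in get_adjacent_positions(x, y, cols, rows):
--         if (adj_x, adj_y) in assigned_positions:
--             adjacent_student = assigned_positions[(adj_x, adj_y)]
--             if adjacent_student in friends:
--                 return True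
--     return False
--
-- def find_non_adjacent_position(student_id, assigned_positions, friend_graph,
--                                 cols, rows, start_idx=0):
--     """
--     Find a position that is not adjacent to any friends.
--
--     Args:
--         student_id: Student to place
--         assigned_positions: Currently assigned positions
--         friend_graph: Friend adjacency dict
--         cols, rows: Room dimensions
--         start_idx: Starting index for search
--
--     Returns:
--         Tuple of (x, y, seat_no) or None if no valid position found
--     """
--     total_seats = cols * rows
--
--     # First pass: find position not adjacent to friends
--     for idx in range(total_seats):
--         x, y = idx % cols, idx // cols
--         if (x, y) in assigned_positions:
--             continue
--         if not is_adjacent_to_friend(x, y, student_id, assigned_positions,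
--                                      friend_graph, cols, rows):
--             return (x, y, idx + 1)
--
--     # Fallback: return any empty position (friends will be flagged by trigger)
--     for idx in range(total_seats):
--         x, y = idx % cols, idx // cols
--         if (x, y) not in assigned_positions:
--             return (x, y, idx + 1)
--
--     return None
-- ===== SOURCE B (Python) =====
-- def find_non_adjacent_position(student_id, assigned_positions, friend_graph,
--                                 cols, rows, start_idx=0):
--     """Staged pipeline: stream the empty seats, pick the first one that passes a
--     direct Chebyshev-distance test against in-bounds friend seats (no neighbor
--     generation), else fall back to the first empty seat."""
--     friends = friend_graph.get(student_id, ())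
--     occupied = set(assigned_positions)
--
--     def empties():
--         for i in range(cols * rows):
--             if (i % cols, i // cols) not in occupied:
--                 yield i
--
--     def near_friend(x, y):
--         return any(sid in friends
--                    and 0 <= fx < cols and 0 <= fy < rows
--                    and abs(fx - x) <= 1 and abs(fy - y) <= 1
--                    and (fx, fy) != (x, y)
--                    for (fx, fy), sid in assigned_positions.items())
--
--     good = next((i for i in empties()
--                  if not near_friend(i % cols, i // cols)), None)
--     if good is None:
--         good = next(empties(), None)
--     if good is None:
--         return None
--     return (good % cols, good // cols, good + 1)
-- ===== Notes on version B (the rewrite author's own statement) =====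
-- stated objective: alternative
-- what changed: B stages the work differently: it materialises the list of empty seats once, tests each candidate by scanning the assigned list directly with a Chebyshev-distance-1 test against in-bounds friend seats (no neighbor-cell generation and no per-neighbor dict lookups), and falls back to the head of the precomputed empty-seat list.
import Mathlib
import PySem

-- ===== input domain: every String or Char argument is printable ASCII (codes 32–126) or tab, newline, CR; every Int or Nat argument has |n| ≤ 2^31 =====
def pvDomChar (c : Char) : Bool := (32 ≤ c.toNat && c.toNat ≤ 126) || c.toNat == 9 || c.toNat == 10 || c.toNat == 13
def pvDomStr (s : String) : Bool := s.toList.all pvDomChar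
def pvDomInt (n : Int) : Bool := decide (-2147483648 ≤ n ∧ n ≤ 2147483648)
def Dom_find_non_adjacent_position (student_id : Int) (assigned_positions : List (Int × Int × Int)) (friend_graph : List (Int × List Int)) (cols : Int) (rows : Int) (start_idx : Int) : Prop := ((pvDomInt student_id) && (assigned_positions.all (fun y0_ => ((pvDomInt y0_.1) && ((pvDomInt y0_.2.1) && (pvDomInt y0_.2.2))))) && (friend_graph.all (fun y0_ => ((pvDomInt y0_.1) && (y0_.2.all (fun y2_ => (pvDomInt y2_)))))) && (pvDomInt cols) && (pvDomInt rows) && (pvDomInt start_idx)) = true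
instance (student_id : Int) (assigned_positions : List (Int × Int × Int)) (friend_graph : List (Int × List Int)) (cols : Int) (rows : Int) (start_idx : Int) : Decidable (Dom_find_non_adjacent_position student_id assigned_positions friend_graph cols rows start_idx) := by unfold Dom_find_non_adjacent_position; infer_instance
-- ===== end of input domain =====

-- B stages the search differently: it lists the empty seats once, tests each candidate by a direct
-- Chebyshev-distance scan of the assigned list (no neighbor-cell generation, no per-neighbor dict
-- lookups), and falls back to the head of the precomputed empty-seat list (objective: alternative).

-- Python dict lookup on the association list (first match), used by A's port:
def pvLookupPos (assigned : List (Int × Int × Int)) (a b : Int) : Option Int :=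
  match assigned with
  | [] => none
  | (x, y, s) :: t => if x = a ∧ y = b then some s else pvLookupPos t a b

def pvLookupFG (fg : List (Int × List Int)) (sid : Int) : Option (List Int) :=
  match fg with
  | [] => none
  | (k, v) :: t => if k = sid then some v else pvLookupFG t sid

-- Python's lazy 'for idx in range(total): ... return ...' loop (early exit), used by A's port
def pvForRange {β : Type} (total : Int) (f : Int → Option β) (idx : Int) : Option β :=
  if h : idx < total then
    match f idx with
    | some r => some r
    | none => pvForRange total f (idx + 1)
  else none
termination_by (total - idx).toNat
decreasing_by omega

-- ===== PORT A =====
def get_adjacent_positions (x y cols rows : Int) : List (Int × Int) :=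
  [(-1 : Int), 0, 1].foldl (fun adjacents dx =>
    [(-1 : Int), 0, 1].foldl (fun adjacents dy =>
      if dx = 0 ∧ dy = 0 then adjacents
      else
        let nx := x + dx
        let ny := y + dy
        if 0 ≤ nx ∧ nx < cols ∧ 0 ≤ ny ∧ ny < rows then adjacents ++ [(nx, ny)]
        else adjacents) adjacents) []

def is_adjacent_to_friend (x y student_id : Int) (assigned_positions : List (Int × Int × Int)) (friend_graph : List (Int × List Int)) (cols rows : Int) : Bool :=
  match pvLookupFG friend_graph student_id with
  | none => false
  | some friends =>
      (get_adjacent_positions x y cols rows).any (fun p =>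
        match pvLookupPos assigned_positions p.1 p.2 with
        | some adjacent_student => decide (adjacent_student ∈ friends)
        | none => false)

def find_non_adjacent_position (student_id : Int) (assigned_positions : List (Int × Int × Int)) (friend_graph : List (Int × List Int)) (cols : Int) (rows : Int) (start_idx : Int) : Option (Int × Int × Int) :=
  let total_seats := cols * rows
  match pvForRange total_seats (fun idx =>
      let x := PySem.Int.mod idx cols
      let y := PySem.Int.floordiv idx cols
      if (pvLookupPos assigned_positions x y).isSome then none
      else if ¬ (is_adjacent_to_friend x y student_id assigned_positions friend_graph cols rows = true) then
        some (x, y, idx + 1)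
      else none) 0 with
  | some r => some r
  | none =>
      pvForRange total_seats (fun idx =>
        let x := PySem.Int.mod idx cols
        let y := PySem.Int.floordiv idx cols
        if ¬ (pvLookupPos assigned_positions x y).isSome then some (x, y, idx + 1) else none) 0

-- ===== PORT B =====
-- friend_graph.get(student_id, ()) (first match, default empty)
def pvFriendsOf (fg : List (Int × List Int)) (sid : Int) : List Int :=
  ((fg.find? (fun p => p.1 == sid)).map Prod.snd).getD []

-- any(sid in friends and 0 <= fx < cols and 0 <= fy < rows and abs(fx-x) <= 1 and abs(fy-y) <= 1
--     and (fx, fy) != (x, y) for (fx, fy), sid in assigned_positions.items())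
def pvNearFriend (x y : Int) (friends : List Int) (assigned : List (Int × Int × Int)) (cols rows : Int) : Bool :=
  assigned.any (fun e =>
    decide (e.2.2 ∈ friends ∧ 0 ≤ e.1 ∧ e.1 < cols ∧ 0 ≤ e.2.1 ∧ e.2.1 < rows ∧
      |e.1 - x| ≤ 1 ∧ |e.2.1 - y| ≤ 1 ∧ ¬(e.1 = x ∧ e.2.1 = y)))

-- next(i for i in range(total) if ok(i)), None): first index passing 'ok' (lazy generator pipeline)
def pvNextIdx (ok : Int → Bool) (total i : Int) : Option Int :=
  if h : i < total then
    if ok i then some i else pvNextIdx ok total (i + 1)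
  else none
termination_by (total - i).toNat
decreasing_by omega

def find_non_adjacent_position_alt (student_id : Int) (assigned_positions : List (Int × Int × Int)) (friend_graph : List (Int × List Int)) (cols : Int) (rows : Int) (start_idx : Int) : Option (Int × Int × Int) :=
  let friends := pvFriendsOf friend_graph student_id
  let occupied : PySem.Set (Int × Int) :=
    PySem.Set.ofList (assigned_positions.map (fun e => (e.1, e.2.1)))
  let isEmpty := fun i =>
    !decide ((PySem.Int.mod i cols, PySem.Int.floordiv i cols) ∈ occupied)
  let good :=
    match pvNextIdx (fun i => isEmpty i &&
        !pvNearFriend (PySem.Int.mod i cols) (PySem.Int.floordiv i cols) friends assigned_positions cols rows)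
        (cols * rows) 0 with
    | some g => some g
    | none => pvNextIdx isEmpty (cols * rows) 0
  match good with
  | none => none
  | some g => some (PySem.Int.mod g cols, PySem.Int.floordiv g cols, g + 1)

-- ===== PRECONDITION & SPEC =====
-- Pre_ excludes association lists whose (x, y) keys repeat: such lists do not represent a Python
-- dict (dict keys are unique; a duplicated key collapses before the function is called).
def Pre_find_non_adjacent_position (student_id : Int) (assigned_positions : List (Int × Int × Int)) (friend_graph : List (Int × List Int)) (cols : Int) (rows : Int) (start_idx : Int) : Prop :=
  (assigned_positions.map (fun e => (e.1, e.2.1))).Nodup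
instance (student_id : Int) (assigned_positions : List (Int × Int × Int)) (friend_graph : List (Int × List Int)) (cols : Int) (rows : Int) (start_idx : Int) : Decidable (Pre_find_non_adjacent_position student_id assigned_positions friend_graph cols rows start_idx) := by unfold Pre_find_non_adjacent_position; infer_instance

def pvWitness_find_non_adjacent_position : Int × (List (Int × Int × Int)) × (List (Int × List Int)) × Int × Int × Int :=
  (1, [(0, 0, 2)], [(1, [2])], 3, 2, 0)

def Spec_find_non_adjacent_position (student_id : Int) (assigned_positions : List (Int × Int × Int)) (friend_graph : List (Int × List Int)) (cols : Int) (rows : Int) (start_idx : Int) (out : Option (Int × Int × Int)) : Prop := out = find_non_adjacent_position_alt student_id assigned_positions friend_graph cols rows start_idx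
instance (student_id : Int) (assigned_positions : List (Int × Int × Int)) (friend_graph : List (Int × List Int)) (cols : Int) (rows : Int) (start_idx : Int) (out : Option (Int × Int × Int)) : Decidable (Spec_find_non_adjacent_position student_id assigned_positions friend_graph cols rows start_idx out) := by unfold Spec_find_non_adjacent_position; infer_instance

-- ===== CLAIM =====
def Claim_equal_find_non_adjacent_position : Prop := ∀ (student_id : Int) (assigned_positions : List (Int × Int × Int)) (friend_graph : List (Int × List Int)) (cols : Int) (rows : Int) (start_idx : Int), Dom_find_non_adjacent_position student_id assigned_positions friend_graph cols rows start_idx → Pre_find_non_adjacent_position student_id assigned_positions friend_graph cols rows start_idx → Spec_find_non_adjacent_position student_id assigned_positions friend_graph cols rows start_idx (find_non_adjacent_position student_id assigned_positions friend_graph cols rows start_idx)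

-- ===== LEMMAS AND PROOFS =====

-- in-bounds and 8-neighbourhood relations
def pvInb (a b cols rows : Int) : Prop := 0 ≤ a ∧ a < cols ∧ 0 ≤ b ∧ b < rows
def pvNbr (x y a b : Int) : Prop := a - x ≤ 1 ∧ x - a ≤ 1 ∧ b - y ≤ 1 ∧ y - b ≤ 1 ∧ ¬(a = x ∧ b = y)

theorem mem_ite_append {α : Type} {c : Prop} [Decidable c] {l : List α} {p a : α} :
    a ∈ (if c then l ++ [p] else l) ↔ a ∈ l ∨ (c ∧ a = p) := by
  split_ifs with h <;> simp_all

-- one inner pass (a fixed dx column) of A's double loop, peeled off so that the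
-- membership characterisation never expands the whole 9-way fold at once
def pvInnerA (x y cols rows dx : Int) (l : List (Int × Int)) : List (Int × Int) :=
  [(-1 : Int), 0, 1].foldl (fun adjacents dy =>
    if dx = 0 ∧ dy = 0 then adjacents
    else
      let nx := x + dx
      let ny := y + dy
      if 0 ≤ nx ∧ nx < cols ∧ 0 ≤ ny ∧ ny < rows then adjacents ++ [(nx, ny)]
      else adjacents) l

theorem mem_pvInnerA (x y cols rows dx : Int) (l : List (Int × Int)) (a b : Int)
    (hdx : dx = -1 ∨ dx = 0 ∨ dx = 1) :
    (a, b) ∈ pvInnerA x y cols rows dx l ↔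
      (a, b) ∈ l ∨ (a = x + dx ∧ (b = y - 1 ∨ b = y ∨ b = y + 1) ∧ ¬(dx = 0 ∧ b = y) ∧
        pvInb a b cols rows) := by
  rcases hdx with rfl | rfl | rfl <;>
  · unfold pvInnerA
    simp only [List.foldl_cons, List.foldl_nil,
      show ((-1 : Int) = 0) = False from by simp,
      show ((1 : Int) = 0) = False from by simp,
      show ((0 : Int) = 0) = True from by simp,
      false_and, and_false, true_and, and_true, and_self, if_false, if_true]
    simp only [mem_ite_append, Prod.mk.injEq, pvInb]
    by_cases hl : (a, b) ∈ l <;> simp [hl] <;> omega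

theorem mem_get_adjacent_positions (p : Int × Int) (x y cols rows : Int) :
    p ∈ get_adjacent_positions x y cols rows ↔ pvNbr x y p.1 p.2 ∧ pvInb p.1 p.2 cols rows := by
  obtain ⟨a, b⟩ := p
  rw [show get_adjacent_positions x y cols rows =
    pvInnerA x y cols rows 1 (pvInnerA x y cols rows 0 (pvInnerA x y cols rows (-1) [])) from rfl]
  rw [mem_pvInnerA _ _ _ _ _ _ _ _ (by norm_num), mem_pvInnerA _ _ _ _ _ _ _ _ (by norm_num),
    mem_pvInnerA _ _ _ _ _ _ _ _ (by norm_num)]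
  simp only [List.not_mem_nil, false_or, pvNbr, pvInb,
    show ((-1 : Int) = 0) = False from by simp,
    show ((1 : Int) = 0) = False from by simp,
    false_and, true_and, not_false_eq_true]
  omega

theorem pvLookupPos_some_mem {assigned : List (Int × Int × Int)} {a b s : Int}
    (h : pvLookupPos assigned a b = some s) : (a, b, s) ∈ assigned := by
  induction assigned with
  | nil => simp [pvLookupPos] at h
  | cons e t ih =>
      obtain ⟨x, y, v⟩ := e
      rw [pvLookupPos] at h
      split_ifs at h with hxy
      · obtain ⟨rfl, rfl⟩ := hxy
        cases h; exact List.mem_cons_self ..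
      · exact List.mem_cons_of_mem _ (ih h)

theorem pvLookupPos_of_mem {assigned : List (Int × Int × Int)} {a b s : Int}
    (hnd : (assigned.map (fun e => (e.1, e.2.1))).Nodup)
    (h : (a, b, s) ∈ assigned) : pvLookupPos assigned a b = some s := by
  induction assigned with
  | nil => simp at h
  | cons e t ih =>
      obtain ⟨x, y, v⟩ := e
      simp only [List.map_cons, List.nodup_cons] at hnd
      rcases List.mem_cons.mp h with he | ht
      · cases he; simp [pvLookupPos]
      · rw [pvLookupPos]
        split_ifs with hxy
        · obtain ⟨rfl, rfl⟩ := hxy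
          exact absurd (List.mem_map.mpr ⟨_, ht, rfl⟩) hnd.1
        · exact ih hnd.2 ht

theorem pvLookupPos_isSome_iff {assigned : List (Int × Int × Int)} {a b : Int} :
    (pvLookupPos assigned a b).isSome = true ↔
      (a, b) ∈ assigned.map (fun e => (e.1, e.2.1)) := by
  induction assigned with
  | nil => simp [pvLookupPos]
  | cons e t ih =>
      obtain ⟨x, y, v⟩ := e
      rw [pvLookupPos]
      split_ifs with hxy
      · obtain ⟨rfl, rfl⟩ := hxy; simp
      · simp only [List.map_cons, List.mem_cons, ih, Prod.mk.injEq]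
        constructor
        · exact Or.inr
        · rintro (h | h)
          · exact absurd ⟨h.1.symm, h.2.symm⟩ hxy
          · exact h

theorem pvFriendsOf_eq (fg : List (Int × List Int)) (sid : Int) :
    pvFriendsOf fg sid = (pvLookupFG fg sid).getD [] := by
  induction fg with
  | nil => rfl
  | cons e t ih =>
      obtain ⟨k, v⟩ := e
      rw [pvFriendsOf, List.find?_cons, pvLookupFG]
      by_cases hk : k = sid
      · simp [hk]
      · simp only [show (k == sid) = false from by simp [hk], if_neg hk]
        exact ih

-- the crux: A's per-candidate neighbour scan equals B's direct Chebyshev scan of the assigned list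
theorem adj_eq_near (x y student_id : Int) (assigned : List (Int × Int × Int))
    (fg : List (Int × List Int)) (cols rows : Int)
    (hnd : (assigned.map (fun e => (e.1, e.2.1))).Nodup) :
    is_adjacent_to_friend x y student_id assigned fg cols rows =
      pvNearFriend x y (pvFriendsOf fg student_id) assigned cols rows := by
  rw [Bool.eq_iff_iff, pvFriendsOf_eq]
  unfold is_adjacent_to_friend pvNearFriend
  cases hfg : pvLookupFG fg student_id with
  | none => simp
  | some friends =>
      simp only [Option.getD_some, List.any_eq_true, decide_eq_true_eq]
      constructor
      · rintro ⟨⟨a, b⟩, hmem, hp⟩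
        rw [mem_get_adjacent_positions] at hmem
        obtain ⟨hnbr, hinb⟩ := hmem
        cases hlk : pvLookupPos assigned a b with
        | none => rw [hlk] at hp; simp at hp
        | some s =>
            rw [hlk] at hp
            simp only [decide_eq_true_eq] at hp
            refine ⟨(a, b, s), pvLookupPos_some_mem hlk, hp, ?_⟩
            unfold pvNbr at hnbr; unfold pvInb at hinb
            simp only [abs_le]
            omega
      · rintro ⟨⟨a, b, s⟩, hmem, hf, hr⟩
        refine ⟨(a, b), ?_, ?_⟩
        · rw [mem_get_adjacent_positions]
          simp only [abs_le] at hr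
          unfold pvNbr pvInb
          omega
        · rw [pvLookupPos_of_mem hnd hmem]
          simpa using hf

-- staged-pass conversions: an early-exit skip/test loop is a first-index search
theorem findSome?_eq_find?_two {β : Type} (l : List Int) (p q : Int → Bool) (f : Int → β) :
    l.findSome? (fun i => if p i = true then none else if ¬ (q i = true) then some (f i) else none)
      = (l.find? (fun i => !p i && !q i)).map f := by
  induction l with
  | nil => rfl
  | cons a t ih =>
      rw [List.findSome?_cons, List.find?_cons]
      by_cases hp : p a = true
      · rw [if_pos hp, show (!p a && !q a) = false from by simp [hp]]
        exact ih
      · by_cases hq : q a = true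
        · rw [if_neg hp, if_neg (by simp [hq] : ¬ ¬ (q a = true)),
            show (!p a && !q a) = false from by simp [hp, hq]]
          exact ih
        · rw [if_neg hp, if_pos hq, show (!p a && !q a) = true from by simp [hp, hq]]
          rfl

theorem findSome?_eq_find?_one {β : Type} (l : List Int) (p : Int → Bool) (f : Int → β) :
    l.findSome? (fun i => if ¬ (p i = true) then some (f i) else none)
      = (l.find? (fun i => !p i)).map f := by
  induction l with
  | nil => rfl
  | cons a t ih =>
      rw [List.findSome?_cons, List.find?_cons]
      by_cases hp : p a = true
      · rw [if_neg (by simp [hp] : ¬ ¬ (p a = true)), show (!p a) = false from by simp [hp]]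
        exact ih
      · rw [if_pos hp, show (!p a) = true from by simp [hp]]
        rfl

theorem pvNextIdx_eq (ok : Int → Bool) (total i : Int) :
    pvNextIdx ok total i = (PySem.List.pyRange i total 1).find? ok := by
  generalize hk : (total - i).toNat = k
  induction k generalizing i with
  | zero =>
      rw [pvNextIdx, dif_neg (by omega), PySem.List.pyRange_one_eq_nil (by omega),
        List.find?_nil]
  | succ n ih =>
      rw [pvNextIdx]
      by_cases h : i < total
      · rw [dif_pos h, PySem.List.pyRange_one_cons h, List.find?_cons]
        cases hok : ok i with
        | true => simp [hok]
        | false => simp only [hok, Bool.false_eq_true, if_false]; exact ih (i + 1) (by omega)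
      · rw [dif_neg h, PySem.List.pyRange_one_eq_nil (by omega), List.find?_nil]

theorem pvForRange_eq {β : Type} (total : Int) (f : Int → Option β) (idx : Int) :
    pvForRange total f idx = (PySem.List.pyRange idx total 1).findSome? f := by
  generalize hk : (total - idx).toNat = k
  induction k generalizing idx with
  | zero =>
      rw [pvForRange, dif_neg (by omega), PySem.List.pyRange_one_eq_nil (by omega),
        List.findSome?_nil]
  | succ n ih =>
      rw [pvForRange]
      split_ifs with h
      · rw [PySem.List.pyRange_one_cons h, List.findSome?_cons]
        cases f idx with
        | some r => rfl
        | none => exact ih (idx + 1) (by omega)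
      · rw [PySem.List.pyRange_one_eq_nil (by omega), List.findSome?_nil]

-- ===== VERDICT =====
theorem find_non_adjacent_position_spec : Claim_equal_find_non_adjacent_position := by
  intro student_id assigned fg cols rows start_idx _hdom hpre
  unfold Spec_find_non_adjacent_position
  unfold find_non_adjacent_position find_non_adjacent_position_alt
  have hocc : ∀ a b : Int, (pvLookupPos assigned a b).isSome =
      decide ((a, b) ∈ PySem.Set.ofList (assigned.map (fun e => (e.1, e.2.1)))) := by
    intro a b
    rw [Bool.eq_iff_iff, pvLookupPos_isSome_iff, decide_eq_true_eq, PySem.Set.mem_ofList]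
  have hadj : ∀ a b : Int, is_adjacent_to_friend a b student_id assigned fg cols rows =
      pvNearFriend a b (pvFriendsOf fg student_id) assigned cols rows :=
    fun a b => adj_eq_near a b student_id assigned fg cols rows hpre
  simp only [pvForRange_eq, hocc, hadj]
  rw [findSome?_eq_find?_two
    (PySem.List.pyRange 0 (cols * rows) 1)
    (fun i => decide ((PySem.Int.mod i cols, PySem.Int.floordiv i cols) ∈
      PySem.Set.ofList (assigned.map (fun e => (e.1, e.2.1)))))
    (fun i => pvNearFriend (PySem.Int.mod i cols) (PySem.Int.floordiv i cols)
      (pvFriendsOf fg student_id) assigned cols rows)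
    (fun i => (PySem.Int.mod i cols, PySem.Int.floordiv i cols, i + 1)),
    findSome?_eq_find?_one
    (PySem.List.pyRange 0 (cols * rows) 1)
    (fun i => decide ((PySem.Int.mod i cols, PySem.Int.floordiv i cols) ∈
      PySem.Set.ofList (assigned.map (fun e => (e.1, e.2.1)))))
    (fun i => (PySem.Int.mod i cols, PySem.Int.floordiv i cols, i + 1)),
    pvNextIdx_eq, pvNextIdx_eq]
  cases hfind : (PySem.List.pyRange 0 (cols * rows) 1).find?
      (fun i => (!decide ((PySem.Int.mod i cols, PySem.Int.floordiv i cols) ∈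
          PySem.Set.ofList (assigned.map (fun e => (e.1, e.2.1))))) &&
        !pvNearFriend (PySem.Int.mod i cols) (PySem.Int.floordiv i cols)
          (pvFriendsOf fg student_id) assigned cols rows) with
  | some i => simp [hfind]
  | none =>
      simp only [hfind, Option.map_none]
      cases hsec : (PySem.List.pyRange 0 (cols * rows) 1).find?
          (fun i => !decide ((PySem.Int.mod i cols, PySem.Int.floordiv i cols) ∈
            PySem.Set.ofList (assigned.map (fun e => (e.1, e.2.1))))) with
      | none => simp [hsec]
      | some g => simp [hsec]
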